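-- pv_equiv track=rewrite | github.com/nour-moalla/PFA | dashboardai/data/02_clean.py | parse_cvss
-- ===== SOURCE A (Python) =====
-- def parse_cvss(cvss_string):
--     result = {'av': 'unknown', 'ac': 'unknown',
--               'pr': 'unknown', 'ui': 'unknown'}
--     try:
--         parts = str(cvss_string).split('/')
--         for part in parts:
--             if part.startswith('AV:'):
--                 av_map = {'N':'network','A':'adjacent','L':'local','P':'physical'}
--                 result['av'] = av_map.get(part.split(':')[1], 'unknown')
--             elif part.startswith('AC:'):
--                 result['ac'] = 'low' if part.endswith('L') else 'high'
--             elif part.startswith('PR:'):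
--                 pr_map = {'N':'none','L':'low','H':'high'}
--                 result['pr'] = pr_map.get(part.split(':')[1], 'unknown')
--             elif part.startswith('UI:'):
--                 result['ui'] = 'none' if part.endswith('N') else 'required'
--     except:
--         pass
--     return result
-- ===== SOURCE B (Python) =====
-- def parse_cvss(cvss_string):
--     # Four independent reverse scans: the first match in the reversed part list
--     # is the last occurrence, which is what A's repeated overwrites end up with.
--     parts = str(cvss_string).split('/')
--
--     def field(prefix, convert):
--         for p in reversed(parts):
--             if p.startswith(prefix):
--                 return convert(p)
--         return 'unknown'
--
--     return {
--         'av': field('AV:', lambda p: {'N': 'network', 'A': 'adjacent', 'L': 'local', 'P': 'physical'}.get(p.split(':')[1], 'unknown')),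
--         'ac': field('AC:', lambda p: 'low' if p.endswith('L') else 'high'),
--         'pr': field('PR:', lambda p: {'N': 'none', 'L': 'low', 'H': 'high'}.get(p.split(':')[1], 'unknown')),
--         'ui': field('UI:', lambda p: 'none' if p.endswith('N') else 'required'),
--     }
-- ===== Notes on version B (the rewrite author's own statement) =====
-- stated objective: alternative
-- what changed: B replaces A's single forward pass with a mutable result dict and an elif dispatch chain by four independent staged reverse scans with early exit (first match in the reversed part list = A's last overwrite), building the result dict as a literal from the four scan results.
import Mathlib
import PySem

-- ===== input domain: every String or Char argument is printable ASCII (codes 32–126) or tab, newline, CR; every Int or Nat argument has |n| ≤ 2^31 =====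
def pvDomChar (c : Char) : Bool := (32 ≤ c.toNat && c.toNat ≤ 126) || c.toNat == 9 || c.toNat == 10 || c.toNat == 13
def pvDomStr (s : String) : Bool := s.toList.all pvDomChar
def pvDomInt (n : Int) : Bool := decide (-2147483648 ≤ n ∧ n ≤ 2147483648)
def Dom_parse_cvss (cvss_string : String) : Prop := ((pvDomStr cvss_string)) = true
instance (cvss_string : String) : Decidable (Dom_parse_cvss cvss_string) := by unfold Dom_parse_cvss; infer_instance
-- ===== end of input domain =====

/- B (parse_cvss_alt) replaces A's single forward pass with an elif dispatch chain by four
   independent reverse scans with early exit (first match in the reversed part list = A's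
   last overwrite), building the result dict as a literal; objective: alternative, same cost. -/


-- ===== PORT A =====
-- part.split(':')[1]; the default "" is unreachable where used (the startswith guard guarantees a colon)
def pvSecond (part : String) : String :=
  PySem.List.pyGetD ((PySem.Str.split? part ":").getD []) 1 ""

-- A's loop body: the elif chain over one part
def pvStepA (d : PySem.Dict String String) (part : String) : PySem.Dict String String :=
  if PySem.Str.startswith part "AV:" then
    d.insert "av" ((PySem.Dict.ofList [("N","network"),("A","adjacent"),("L","local"),("P","physical")]).getD (pvSecond part) "unknown")
  else if PySem.Str.startswith part "AC:" then
    d.insert "ac" (if PySem.Str.endswith part "L" then "low" else "high")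
  else if PySem.Str.startswith part "PR:" then
    d.insert "pr" ((PySem.Dict.ofList [("N","none"),("L","low"),("H","high")]).getD (pvSecond part) "unknown")
  else if PySem.Str.startswith part "UI:" then
    d.insert "ui" (if PySem.Str.endswith part "N" then "none" else "required")
  else d

-- str(cvss_string) is the identity on a String argument; no statement in the try block can raise,
-- so the except branch is dead and is not modelled.
def parse_cvss (cvss_string : String) : List (String × String) :=
  (((PySem.Str.split? cvss_string "/").getD []).foldl pvStepA
    (PySem.Dict.ofList [("av","unknown"),("ac","unknown"),("pr","unknown"),("ui","unknown")])).items

-- ===== PORT B =====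
-- the four conversion lambdas of Source B
def pvVAV (p : String) : String :=
  (PySem.Dict.ofList [("N","network"),("A","adjacent"),("L","local"),("P","physical")]).getD (pvSecond p) "unknown"
def pvVAC (p : String) : String := if PySem.Str.endswith p "L" then "low" else "high"
def pvVPR (p : String) : String :=
  (PySem.Dict.ofList [("N","none"),("L","low"),("H","high")]).getD (pvSecond p) "unknown"
def pvVUI (p : String) : String := if PySem.Str.endswith p "N" then "none" else "required"

-- the for-loop inside field(): first element (early return) satisfying the prefix test
def pvFirstSat (q : String → Bool) : List String → Option String
  | [] => none
  | p :: rest => if q p then some p else pvFirstSat q rest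

-- field(prefix, convert): scan reversed(parts), convert the first hit, else 'unknown'
def pvField (parts : List String) (pre : String) (conv : String → String) : String :=
  match pvFirstSat (fun p => PySem.Str.startswith p pre) parts.reverse with
  | some p => conv p
  | none => "unknown"

def parse_cvss_alt (cvss_string : String) : List (String × String) :=
  let parts := (PySem.Str.split? cvss_string "/").getD []
  [("av", pvField parts "AV:" pvVAV),
   ("ac", pvField parts "AC:" pvVAC),
   ("pr", pvField parts "PR:" pvVPR),
   ("ui", pvField parts "UI:" pvVUI)]

-- ===== PRECONDITION & SPEC =====
def Spec_parse_cvss (cvss_string : String) (out : List (String × String)) : Prop := out = parse_cvss_alt cvss_string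
instance (cvss_string : String) (out : List (String × String)) : Decidable (Spec_parse_cvss cvss_string out) := by unfold Spec_parse_cvss; infer_instance

-- ===== CLAIM =====
def Claim_equal_parse_cvss : Prop := ∀ (cvss_string : String), Dom_parse_cvss cvss_string → Spec_parse_cvss cvss_string (parse_cvss cvss_string)

-- ===== LEMMAS AND PROOFS =====

-- last element of l satisfying q (none if there is none)
def pvLastSat (q : String → Bool) : List String → Option String
  | [] => none
  | p :: rest => (pvLastSat q rest).or (if q p then some p else none)

-- the four-entry result dict with symbolic values
def pvFour (a c pr u : String) : PySem.Dict String String :=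
  PySem.Dict.ofList [("av",a),("ac",c),("pr",pr),("ui",u)]

-- value of one field after A's loop: the last part satisfying q, mapped through v, else the accumulator
def pvUpd (q : String → Bool) (v : String → String) (x : String) (l : List String) : String :=
  match pvLastSat q l with
  | some p => v p
  | none => x

lemma pvKey3_toList (p : String) : (PySem.Str.slice p none (some 3)).toList = p.toList.take 3 := by
  have h := PySem.List.slice_to (xs := p.toList) (b := 3) (by norm_num)
  rw [PySem.Str.toList_slice, PySem.Chars.slice_eq_listSlice, h]; rfl

-- part[:3] == K (|K| = 3) is exactly part.startswith(K)
lemma pvKey3_beq (p K : String) (hK : K.toList.length = 3) :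
    (PySem.Str.slice p none (some 3) == K) = PySem.Str.startswith p K := by
  rw [PySem.Str.startswith_eq]
  by_cases h : PySem.Chars.startswith p.toList K.toList = true
  · rw [h, beq_iff_eq]
    rw [PySem.Chars.startswith_iff, List.prefix_iff_eq_take, hK] at h
    exact String.toList_inj.mp (by rw [pvKey3_toList, ← h])
  · rw [Bool.not_eq_true] at h
    rw [h, beq_eq_false_iff_ne]
    intro hc
    rw [← Bool.not_eq_true, PySem.Chars.startswith_iff, List.prefix_iff_eq_take, hK] at h
    exact h (by rw [← pvKey3_toList, hc])

-- a string cannot start with two different length-3 prefixes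
lemma pv_excl (s K1 K2 : String) (h1 : K1.toList.length = 3) (h2 : K2.toList.length = 3)
    (hne : K1 ≠ K2) (h : PySem.Str.startswith s K1 = true) :
    PySem.Str.startswith s K2 = false := by
  rw [← pvKey3_beq _ _ h1, beq_iff_eq] at h
  rw [← pvKey3_beq _ _ h2, beq_eq_false_iff_ne, h]
  exact hne

-- A's elif chain on the four-entry dict updates each field independently
lemma pvStepA_four (a c pr u part : String) :
    pvStepA (pvFour a c pr u) part =
      pvFour (if PySem.Str.startswith part "AV:" then pvVAV part else a)
             (if PySem.Str.startswith part "AC:" then pvVAC part else c)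
             (if PySem.Str.startswith part "PR:" then pvVPR part else pr)
             (if PySem.Str.startswith part "UI:" then pvVUI part else u) := by
  by_cases h1 : PySem.Str.startswith part "AV:" = true
  · have e2 := pv_excl part "AV:" "AC:" (by decide) (by decide) (by decide) h1
    have e3 := pv_excl part "AV:" "PR:" (by decide) (by decide) (by decide) h1
    have e4 := pv_excl part "AV:" "UI:" (by decide) (by decide) (by decide) h1
    simp only [pvStepA, h1, e2, e3, e4, if_true, Bool.false_eq_true, if_false]; rfl
  · rw [Bool.not_eq_true] at h1
    by_cases h2 : PySem.Str.startswith part "AC:" = true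
    · have e3 := pv_excl part "AC:" "PR:" (by decide) (by decide) (by decide) h2
      have e4 := pv_excl part "AC:" "UI:" (by decide) (by decide) (by decide) h2
      simp only [pvStepA, h1, h2, e3, e4, if_true, Bool.false_eq_true, if_false]; rfl
    · rw [Bool.not_eq_true] at h2
      by_cases h3 : PySem.Str.startswith part "PR:" = true
      · have e4 := pv_excl part "PR:" "UI:" (by decide) (by decide) (by decide) h3
        simp only [pvStepA, h1, h2, h3, e4, if_true, Bool.false_eq_true, if_false]; rfl
      · rw [Bool.not_eq_true] at h3
        by_cases h4 : PySem.Str.startswith part "UI:" = true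
        · simp only [pvStepA, h1, h2, h3, h4, if_true, Bool.false_eq_true, if_false]; rfl
        · rw [Bool.not_eq_true] at h4
          simp only [pvStepA, h1, h2, h3, h4, Bool.false_eq_true, if_false]

lemma pvUpd_cons (q : String → Bool) (v : String → String) (x p : String) (l : List String) :
    pvUpd q v x (p :: l) = pvUpd q v (if q p then v p else x) l := by
  unfold pvUpd
  rw [pvLastSat]
  cases pvLastSat q l <;> by_cases h : q p = true <;> simp [h]

-- A's whole loop, characterised field by field
lemma pvFoldA (l : List String) : ∀ a c pr u : String,
    l.foldl pvStepA (pvFour a c pr u) =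
      pvFour (pvUpd (fun p => PySem.Str.startswith p "AV:") pvVAV a l)
             (pvUpd (fun p => PySem.Str.startswith p "AC:") pvVAC c l)
             (pvUpd (fun p => PySem.Str.startswith p "PR:") pvVPR pr l)
             (pvUpd (fun p => PySem.Str.startswith p "UI:") pvVUI u l) := by
  induction l with
  | nil => intro a c pr u; rfl
  | cons p l ih =>
    intro a c pr u
    rw [List.foldl_cons, pvStepA_four, ih, pvUpd_cons, pvUpd_cons, pvUpd_cons, pvUpd_cons]

lemma pvFirstSat_append (q : String → Bool) (xs ys : List String) :
    pvFirstSat q (xs ++ ys) = (pvFirstSat q xs).or (pvFirstSat q ys) := by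
  induction xs with
  | nil => rfl
  | cons p xs ih =>
    rw [List.cons_append, pvFirstSat, pvFirstSat, ih]
    by_cases h : q p = true <;> simp [h]

-- first match in the reversed list = last match in the list
lemma pvFirstSat_reverse (q : String → Bool) (l : List String) :
    pvFirstSat q l.reverse = pvLastSat q l := by
  induction l with
  | nil => rfl
  | cons p l ih =>
    rw [List.reverse_cons, pvFirstSat_append, ih, pvLastSat]
    rfl

-- ===== VERDICT =====
theorem parse_cvss_spec : Claim_equal_parse_cvss := by
  intro s _
  unfold Spec_parse_cvss parse_cvss parse_cvss_alt
  have hfold := pvFoldA ((PySem.Str.split? s "/").getD []) "unknown" "unknown" "unknown" "unknown"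
  show (((PySem.Str.split? s "/").getD []).foldl pvStepA (pvFour "unknown" "unknown" "unknown" "unknown")).items = _
  rw [hfold]
  unfold pvField pvUpd
  simp only [pvFirstSat_reverse]
  cases pvLastSat (fun p => PySem.Str.startswith p "AV:") ((PySem.Str.split? s "/").getD []) <;>
  cases pvLastSat (fun p => PySem.Str.startswith p "AC:") ((PySem.Str.split? s "/").getD []) <;>
  cases pvLastSat (fun p => PySem.Str.startswith p "PR:") ((PySem.Str.split? s "/").getD []) <;>
  rfl
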